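-- pv_equiv track=rewrite | github.com/shatianming5/open-problem-atlas | verifiers/checkers/math/caccetta_haggkvist_checker.py | _has_directed_cycle_of_length_at_most
-- ===== SOURCE A (Python) =====
-- def _has_directed_cycle_of_length_at_most(adj: dict, n: int, max_len: int) -> bool:
--     """Check if the directed graph has a directed cycle of length <= max_len."""
--     for start in range(n):
--         # BFS/DFS up to depth max_len
--         stack = [(start, [start])]
--         while stack:
--             u, path = stack.pop()
--             for v in adj.get(u, []):
--                 if v == start and len(path) >= 2:
--                     return True
--                 if v not in path and len(path) < max_len:
--                     stack.append((v, path + [v]))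
--     return False
-- ===== SOURCE B (Python) =====
-- def _has_directed_cycle_of_length_at_most(adj: dict, n: int, max_len: int) -> bool:
--     """Check if the directed graph has a directed cycle of length <= max_len.
--
--     Layered BFS from each start: a cycle of length 2..max_len through `start`
--     exists iff some vertex u != start reachable within max_len-1 steps has an
--     edge back to start.
--     """
--     for start in range(n):
--         visited = {start}
--         frontier = [start]
--         steps = max_len - 1
--         while frontier and steps > 0:
--             nxt = []
--             for u in frontier:
--                 for v in adj.get(u, []):
--                     if v not in visited:
--                         visited.add(v)
--                         nxt.append(v)
--             frontier = nxt
--             steps -= 1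
--         if any(u != start and start in adj.get(u, []) for u in visited):
--             return True
--     return False
-- ===== Notes on version B (the rewrite author's own statement) =====
-- stated objective: alternative
-- what changed: Replaced A's stack-driven DFS enumeration of all simple paths from each start by a per-start layered BFS with a visited set (at most max_len-1 levels) followed by a single scan for a back-edge to start; worst-case exponential path enumeration becomes polynomial, but on typical inputs the cost is similar.
import Mathlib
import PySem

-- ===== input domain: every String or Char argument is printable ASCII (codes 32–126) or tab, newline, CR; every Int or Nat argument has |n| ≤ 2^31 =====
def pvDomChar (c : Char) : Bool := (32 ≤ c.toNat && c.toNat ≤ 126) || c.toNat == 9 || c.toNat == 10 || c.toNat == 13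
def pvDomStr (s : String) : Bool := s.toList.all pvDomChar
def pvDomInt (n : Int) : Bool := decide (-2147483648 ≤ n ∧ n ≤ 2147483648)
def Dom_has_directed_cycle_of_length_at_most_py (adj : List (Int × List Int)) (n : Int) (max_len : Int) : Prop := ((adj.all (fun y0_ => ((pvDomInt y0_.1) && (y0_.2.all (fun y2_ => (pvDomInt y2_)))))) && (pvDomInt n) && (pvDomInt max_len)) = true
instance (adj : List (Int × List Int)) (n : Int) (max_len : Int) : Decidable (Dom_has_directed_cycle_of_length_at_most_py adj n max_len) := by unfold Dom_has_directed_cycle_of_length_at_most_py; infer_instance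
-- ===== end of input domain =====

-- B replaces A's DFS over all simple paths by a per-start layered BFS with a visited
-- set (cycle through `start` of length ≤ max_len ⟺ some u ≠ start within max_len-1
-- BFS levels has an edge back to start); objective: alternative algorithm.

-- ===== PORT A =====

-- adj.get(u, []) — first-match lookup on the association list (exact: a Python dict has unique keys)
def pvNbrs : List (Int × List Int) → Int → List Int
  | [], _ => []
  | (k, vs) :: t, u => if k = u then vs else pvNbrs t u

-- the inner `for v in adj.get(u, [])` loop: returns (found-True?, items pushed, in order)
def pvAInner (start max_len : Int) (path : List Int) : List Int → Bool × List (Int × List Int)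
  | [] => (false, [])
  | v :: vs =>
    if v = start ∧ 2 ≤ path.length then (true, [])
    else
      let r := pvAInner start max_len path vs
      if v ∉ path ∧ (path.length : Int) < max_len then (r.1, (v, path ++ [v]) :: r.2) else r

-- termination measure helpers (proof-only; never computed)
def pvD (adj : List (Int × List Int)) : Nat := (adj.map (fun kv => kv.2.length)).foldr Nat.max 0
def pvM (max_len : Int) : Nat := (max max_len 1).toNat
def pvF (D M : Nat) (p : List Int) : Nat := (D + 1) ^ (M - min p.length M)
def pvMeasure (D M : Nat) (stack : List (Int × List Int)) : Nat :=
  (stack.map (fun it => pvF D M it.2)).sum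

theorem pvNbrs_len (adj : List (Int × List Int)) (u : Int) : (pvNbrs adj u).length ≤ pvD adj := by
  induction adj with
  | nil => simp [pvNbrs, pvD]
  | cons kv t ih =>
    obtain ⟨k, vs⟩ := kv
    simp only [pvNbrs, pvD, List.map_cons, List.foldr_cons]
    split
    · exact Nat.le_max_left _ _
    · exact le_trans ih (Nat.le_max_right _ _)

theorem pvAInner_len (s ml : Int) (path vs : List Int) :
    ((pvAInner s ml path vs).2).length ≤ vs.length := by
  induction vs with
  | nil => simp [pvAInner]
  | cons v t ih =>
    simp only [pvAInner]
    split
    · simp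
    · split
      · simpa using Nat.succ_le_succ ih
      · exact le_trans ih (Nat.le_succ _)

theorem pvAInner_mem (s ml : Int) (path vs : List Int) :
    ∀ it ∈ (pvAInner s ml path vs).2,
      ∃ v ∈ vs, v ∉ path ∧ (path.length : Int) < ml ∧ it = (v, path ++ [v]) := by
  induction vs with
  | nil => simp [pvAInner]
  | cons v t ih =>
    intro it hit
    simp only [pvAInner] at hit
    split at hit
    · simp at hit
    · split at hit
      next hc =>
        rcases List.mem_cons.1 hit with h | h
        · exact ⟨v, List.mem_cons_self .., hc.1, hc.2, h⟩
        · obtain ⟨w, hw, h1, h2, h3⟩ := ih it h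
          exact ⟨w, List.mem_cons_of_mem _ hw, h1, h2, h3⟩
      next =>
        obtain ⟨w, hw, h1, h2, h3⟩ := ih it hit
        exact ⟨w, List.mem_cons_of_mem _ hw, h1, h2, h3⟩

theorem pvSum_lt (D M : Nat) (path : List Int) (items : List (Int × List Int))
    (hlen : ∀ it ∈ items, it.2.length = path.length + 1 ∧ path.length < M)
    (hcount : items.length ≤ D) :
    (items.map (fun it => pvF D M it.2)).sum < pvF D M path := by
  rcases items with _ | ⟨it0, rest⟩
  · simp only [List.map_nil, List.sum_nil, pvF]
    exact Nat.pow_pos (Nat.succ_pos D)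
  · have hlt : path.length < M := (hlen it0 (List.mem_cons_self ..)).2
    have hminp : min path.length M = path.length := Nat.min_eq_left (Nat.le_of_lt hlt)
    have hval : ∀ it ∈ it0 :: rest, pvF D M it.2 = (D + 1) ^ (M - (path.length + 1)) := by
      intro it hit
      have h := hlen it hit
      simp [pvF, h.1, Nat.min_eq_left (Nat.succ_le_of_lt hlt)]
    calc ((it0 :: rest).map (fun it => pvF D M it.2)).sum
        ≤ ((it0 :: rest).map (fun it => pvF D M it.2)).length • ((D + 1) ^ (M - (path.length + 1))) := by
          apply List.sum_le_card_nsmul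
          intro x hx
          obtain ⟨it, hit, rfl⟩ := List.mem_map.1 hx
          exact le_of_eq (hval it hit)
      _ = (it0 :: rest).length * (D + 1) ^ (M - (path.length + 1)) := by simp [smul_eq_mul]
      _ ≤ D * (D + 1) ^ (M - (path.length + 1)) := Nat.mul_le_mul_right _ hcount
      _ < (D + 1) * (D + 1) ^ (M - (path.length + 1)) := by
          have hp : 0 < (D + 1) ^ (M - (path.length + 1)) := Nat.pow_pos (Nat.succ_pos D)
          exact Nat.mul_lt_mul_of_lt_of_le (Nat.lt_succ_self D) (le_refl _) hp
      _ = (D + 1) ^ (M - (path.length + 1) + 1) := by ring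
      _ = pvF D M path := by
          simp only [pvF, hminp]
          congr 1
          omega

-- the `while stack:` loop (stack top = list head; Python pops from the end)
def pvALoop (adj : List (Int × List Int)) (start max_len : Int) :
    List (Int × List Int) → Bool
  | [] => false
  | (u, path) :: rest =>
    let r := pvAInner start max_len path (pvNbrs adj u)
    if r.1 then true else pvALoop adj start max_len (r.2.reverse ++ rest)
termination_by stack => pvMeasure (pvD adj) (pvM max_len) stack
decreasing_by
  simp only [pvMeasure, List.map_append, List.sum_append, List.map_cons, List.sum_cons,
    List.map_reverse, List.sum_reverse]
  have hkey : ((pvAInner start max_len path (pvNbrs adj u)).2.map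
      (fun it => pvF (pvD adj) (pvM max_len) it.2)).sum < pvF (pvD adj) (pvM max_len) path := by
    apply pvSum_lt
    · intro it hit
      obtain ⟨v, _, _, hml, rfl⟩ := pvAInner_mem _ _ _ _ it hit
      constructor
      · simp
      · have : (0:Int) ≤ max max_len 1 := by omega
        simp only [pvM]
        omega
    · exact le_trans (pvAInner_len _ _ _ _) (pvNbrs_len adj u)
  omega

-- `for start in range(n): … return True … / return False`
def pvAOuter (adj : List (Int × List Int)) (max_len : Int) : List Int → Bool
  | [] => false
  | s :: t =>
    if pvALoop adj s max_len [(s, [s])] then true else pvAOuter adj max_len t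

def has_directed_cycle_of_length_at_most_py (adj : List (Int × List Int)) (n : Int) (max_len : Int) : Bool :=
  pvAOuter adj max_len (PySem.List.pyRange 0 n 1)

-- ===== PORT B =====

-- inner `for v in adj.get(u, []): if v not in visited: visited.add(v); nxt.append(v)`
def pvBExpandOne (vis : PySem.Set Int) (nxt : List Int) : List Int → PySem.Set Int × List Int
  | [] => (vis, nxt)
  | v :: t =>
    if v ∈ vis then pvBExpandOne vis nxt t
    else pvBExpandOne (PySem.Set.add vis v) (nxt ++ [v]) t

-- `for u in frontier: …`
def pvBExpand (adj : List (Int × List Int)) (vis : PySem.Set Int) (nxt : List Int) :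
    List Int → PySem.Set Int × List Int
  | [] => (vis, nxt)
  | u :: t =>
    let r := pvBExpandOne vis nxt (pvNbrs adj u)
    pvBExpand adj r.1 r.2 t

-- `while frontier and steps > 0:` — fuel = number of remaining positive steps
def pvBLoop (adj : List (Int × List Int)) : Nat → PySem.Set Int → List Int → PySem.Set Int
  | 0, vis, _ => vis
  | _ + 1, vis, [] => vis
  | fuel + 1, vis, fr =>
    let r := pvBExpand adj vis [] fr
    pvBLoop adj fuel r.1 r.2

-- one start: BFS then `any(u != start and start in adj.get(u, []) for u in visited)`
def pvBStart (adj : List (Int × List Int)) (max_len : Int) (s : Int) : Bool :=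
  let visited := pvBLoop adj (max_len - 1).toNat (PySem.Set.ofList [s]) [s]
  visited.any (fun u => decide (u ≠ s) && (pvNbrs adj u).contains s)

def pvBOuter (adj : List (Int × List Int)) (max_len : Int) : List Int → Bool
  | [] => false
  | s :: t => if pvBStart adj max_len s then true else pvBOuter adj max_len t

def has_directed_cycle_of_length_at_most_py_alt (adj : List (Int × List Int)) (n : Int) (max_len : Int) : Bool :=
  pvBOuter adj max_len (PySem.List.pyRange 0 n 1)

-- ===== PRECONDITION & SPEC =====
def Spec_has_directed_cycle_of_length_at_most_py (adj : List (Int × List Int)) (n : Int) (max_len : Int) (out : Bool) : Prop := out = has_directed_cycle_of_length_at_most_py_alt adj n max_len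
instance (adj : List (Int × List Int)) (n : Int) (max_len : Int) (out : Bool) : Decidable (Spec_has_directed_cycle_of_length_at_most_py adj n max_len out) := by unfold Spec_has_directed_cycle_of_length_at_most_py; infer_instance

-- ===== CLAIM (what is proved, stated in full; the proofs are below) =====
def Claim_equal_has_directed_cycle_of_length_at_most_py : Prop := ∀ (adj : List (Int × List Int)) (n : Int) (max_len : Int), Dom_has_directed_cycle_of_length_at_most_py adj n max_len → Spec_has_directed_cycle_of_length_at_most_py adj n max_len (has_directed_cycle_of_length_at_most_py adj n max_len)

-- ===== LEMMAS AND PROOFS =====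

-- success predicate of A's DFS exploration from one stack item
inductive pvGood (adj : List (Int × List Int)) (s ml : Int) : Int → List Int → Prop where
  | found {u path v} : v ∈ pvNbrs adj u → v = s → 2 ≤ path.length → pvGood adj s ml u path
  | step {u path v} : v ∈ pvNbrs adj u → v ∉ path → (path.length : Int) < ml →
      pvGood adj s ml v (path ++ [v]) → pvGood adj s ml u path

theorem pvAInner_fst_iff (s ml : Int) (path vs : List Int) :
    (pvAInner s ml path vs).1 = true ↔ ∃ v ∈ vs, v = s ∧ 2 ≤ path.length := by
  induction vs with
  | nil => simp [pvAInner]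
  | cons v t ih =>
    simp only [pvAInner]
    split
    next h => simp only [true_iff]; exact ⟨v, List.mem_cons_self .., h⟩
    next h =>
      have : ((let r := pvAInner s ml path t;
          if v ∉ path ∧ (path.length : Int) < ml then (r.1, (v, path ++ [v]) :: r.2) else r).1)
          = (pvAInner s ml path t).1 := by
        simp only []
        split <;> rfl
      rw [this, ih]
      constructor
      · rintro ⟨w, hw, h1, h2⟩; exact ⟨w, List.mem_cons_of_mem _ hw, h1, h2⟩
      · rintro ⟨w, hw, h1, h2⟩
        rcases List.mem_cons.1 hw with rfl | hw'
        · exact absurd ⟨h1, h2⟩ h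
        · exact ⟨w, hw', h1, h2⟩

theorem pvAInner_mem_intro (s ml : Int) (path vs : List Int) (v : Int)
    (hfst : (pvAInner s ml path vs).1 = false) (hv : v ∈ vs) (h1 : v ∉ path)
    (h2 : (path.length : Int) < ml) : (v, path ++ [v]) ∈ (pvAInner s ml path vs).2 := by
  induction vs with
  | nil => simp at hv
  | cons w t ih =>
    by_cases hws : w = s ∧ 2 ≤ path.length
    · exfalso; simp [pvAInner, hws] at hfst
    · have hrw : pvAInner s ml path (w :: t) =
        (let r := pvAInner s ml path t;
         if w ∉ path ∧ (path.length : Int) < ml then (r.1, (w, path ++ [w]) :: r.2) else r) := by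
        simp [pvAInner, hws]
      by_cases hpc : w ∉ path ∧ (path.length : Int) < ml
      · rw [hrw] at hfst ⊢
        simp only [if_pos hpc] at hfst ⊢
        rcases List.mem_cons.1 hv with rfl | hv'
        · exact List.mem_cons_self ..
        · exact List.mem_cons_of_mem _ (ih hfst hv')
      · rw [hrw] at hfst ⊢
        simp only [if_neg hpc] at hfst ⊢
        rcases List.mem_cons.1 hv with rfl | hv'
        · exact absurd ⟨h1, h2⟩ hpc
        · exact ih hfst hv'

theorem pvALoop_iff (adj : List (Int × List Int)) (s ml : Int) (stack : List (Int × List Int)) :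
    pvALoop adj s ml stack = true ↔ ∃ it ∈ stack, pvGood adj s ml it.1 it.2 := by
  fun_induction pvALoop adj s ml stack with
  | case1 => simp
  | case2 u path rest r hr =>
    simp only [true_iff]
    obtain ⟨v, hv, rfl, h2⟩ := (pvAInner_fst_iff s ml path (pvNbrs adj u)).1 hr
    exact ⟨(u, path), List.mem_cons_self .., pvGood.found hv rfl h2⟩
  | case3 u path rest r hr ih =>
    rw [ih]
    have hfst : (pvAInner s ml path (pvNbrs adj u)).1 = false := by
      simpa using hr
    constructor
    · rintro ⟨it, hit, hg⟩
      rcases List.mem_append.1 hit with hmem | hmem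
      · obtain ⟨v, hv, h1, h2, rfl⟩ :=
          pvAInner_mem s ml path (pvNbrs adj u) it (List.mem_reverse.1 hmem)
        exact ⟨(u, path), List.mem_cons_self .., pvGood.step hv h1 h2 hg⟩
      · exact ⟨it, List.mem_cons_of_mem _ hmem, hg⟩
    · rintro ⟨it, hit, hg⟩
      rcases List.mem_cons.1 hit with rfl | hmem
      · cases hg with
        | found hv hvs h2 =>
          exfalso
          have : (pvAInner s ml path (pvNbrs adj u)).1 = true :=
            (pvAInner_fst_iff s ml path (pvNbrs adj u)).2 ⟨_, hv, hvs, h2⟩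
          rw [hfst] at this; exact Bool.false_ne_true this
        | step hv h1 h2 hg' =>
          refine ⟨(_, path ++ [_]), List.mem_append.2 (Or.inl (List.mem_reverse.2 ?_)), hg'⟩
          exact pvAInner_mem_intro s ml path (pvNbrs adj u) _ hfst hv h1 h2
      · exact ⟨it, List.mem_append.2 (Or.inr hmem), hg⟩

-- reachability from s by a walk of at most d steps
def pvW (adj : List (Int × List Int)) (s : Int) : Nat → Int → Prop
  | 0, u => u = s
  | d + 1, u => pvW adj s d u ∨ ∃ w, pvW adj s d w ∧ u ∈ pvNbrs adj w

theorem pvW_mono (adj : List (Int × List Int)) (s : Int) {d e : Nat} (h : d ≤ e) {u : Int}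
    (hw : pvW adj s d u) : pvW adj s e u := by
  induction e with
  | zero =>
    have : d = 0 := by omega
    subst this; exact hw
  | succ e ih =>
    rcases Nat.lt_or_ge d (e + 1) with h' | h'
    · exact Or.inl (ih (by omega))
    · have : d = e + 1 := by omega
      subst this; exact hw

theorem pvGood_forward (adj : List (Int × List Int)) (s ml : Int) (u : Int) (path : List Int)
    (hg : pvGood adj s ml u path) :
    path.Nodup → path.head? = some s → path.getLast? = some u →
    pvW adj s (path.length - 1) u → ((path.length : Int) ≤ ml ∨ path.length = 1) →
    ∃ w, w ≠ s ∧ pvW adj s ((ml - 1).toNat) w ∧ s ∈ pvNbrs adj w := by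
  induction hg with
  | @found u path v hv hvs h2 =>
    intro hnd hh hl hw hb
    obtain ⟨pre, rfl⟩ := List.getLast?_eq_some_iff.1 hl
    have hpre : pre ≠ [] := by
      intro h; subst h; simp at h2
    have hune : u ≠ s := by
      intro h; subst h
      have hnu : u ∉ pre := by
        have hx := List.nodup_append.1 hnd
        intro hm
        exact hx.2.2 u hm u (List.mem_cons_self ..) rfl
      have : (pre ++ [u]).head? = pre.head? := by
        cases pre with
        | nil => exact absurd rfl hpre
        | cons a t => simp
      rw [this] at hh
      obtain ⟨t2, ht2⟩ := List.head?_eq_some_iff.1 hh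
      exact hnu (ht2 ▸ List.mem_cons_self ..)
    have hml : ((pre ++ [u]).length : Int) ≤ ml := by
      rcases hb with h | h
      · exact h
      · exfalso; omega
    refine ⟨u, hune, pvW_mono adj s ?_ hw, hvs ▸ hv⟩
    have hc : ((pre ++ [u]).length : Int) ≤ ml := hml
    simp only [List.length_append, List.length_cons, List.length_nil] at hc h2 ⊢
    omega
  | @step u path v hv h1 h2 hg' ih =>
    intro hnd hh hl hw hb
    have hpne : path ≠ [] := by
      obtain ⟨pre, rfl⟩ := List.getLast?_eq_some_iff.1 hl
      simp
    apply ih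
    · simp [List.nodup_append, hnd]
      intro x hx hxv; subst hxv; exact h1 hx
    · rw [List.head?_append_of_ne_nil _ hpne]
      exact hh
    · simp
    · have hlp : 1 ≤ path.length := List.length_pos_iff.2 hpne
      have : pvW adj s (path.length - 1 + 1) v := Or.inr ⟨u, hw, hv⟩
      have he : path.length - 1 + 1 = path.length := by omega
      rw [he] at this
      simpa using this
    · left
      simp only [List.length_append, List.length_cons, List.length_nil]
      push_cast
      omega

theorem pvW_to_path (adj : List (Int × List Int)) (s : Int) (d : Nat) (u : Int)
    (hw : pvW adj s d u) :
    ∃ p : List Int, p.head? = some s ∧ p.getLast? = some u ∧ p.Nodup ∧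
      p.IsChain (fun a b => b ∈ pvNbrs adj a) ∧ p.length ≤ d + 1 := by
  induction d generalizing u with
  | zero =>
    simp only [pvW] at hw
    exact ⟨[s], by simp, by simp [hw], by simp, by simp, by simp⟩
  | succ d ih =>
    rcases hw with hw | ⟨w, hww, hu⟩
    · obtain ⟨p, h1, h2, h3, h4, h5⟩ := ih u hw
      exact ⟨p, h1, h2, h3, h4, le_trans h5 (Nat.le_succ _)⟩
    · obtain ⟨p, h1, h2, h3, h4, h5⟩ := ih w hww
      by_cases hmem : u ∈ p
      · obtain ⟨p₁, p₂, rfl⟩ := List.append_of_mem hmem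
        refine ⟨p₁ ++ [u], ?_, by simp, ?_, ?_, ?_⟩
        · have hassoc : p₁ ++ u :: p₂ = (p₁ ++ [u]) ++ p₂ := by simp
          rw [hassoc, List.head?_append_of_ne_nil _ (by simp : p₁ ++ [u] ≠ [])] at h1
          exact h1
        · have hsub : (p₁ ++ [u]).Sublist (p₁ ++ u :: p₂) := by
            simp
          exact h3.sublist hsub
        · have hassoc : p₁ ++ u :: p₂ = (p₁ ++ [u]) ++ p₂ := by simp
          rw [hassoc] at h4
          exact (List.isChain_append.1 h4).1
        · have : p₁.length + 1 ≤ (p₁ ++ u :: p₂).length := by simp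
          simp only [List.length_append, List.length_cons, List.length_nil]
          have h5' := h5
          simp only [List.length_append, List.length_cons] at h5'
          omega
      · have hpne : p ≠ [] := by
          obtain ⟨pre, rfl⟩ := List.getLast?_eq_some_iff.1 h2
          simp
        refine ⟨p ++ [u], ?_, by simp, ?_, ?_, ?_⟩
        · rw [List.head?_append_of_ne_nil _ hpne]; exact h1
        · rw [List.nodup_append]
          refine ⟨h3, by simp, ?_⟩
          intro a ha b hb
          simp only [List.mem_cons, List.not_mem_nil, or_false] at hb
          subst hb
          intro hab; subst hab; exact hmem ha
        · rw [List.isChain_append]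
          refine ⟨h4, by simp, ?_⟩
          intro x hx y hy
          simp only [List.head?_cons, Option.mem_def, Option.some.injEq] at hy
          rw [h2] at hx
          simp only [Option.mem_def, Option.some.injEq] at hx
          subst hx; subst hy
          exact hu
        · simp only [List.length_append, List.length_cons, List.length_nil]
          omega

theorem pvPath_to_good (adj : List (Int × List Int)) (s ml : Int) (P : List Int) (u : Int)
    (hh : P.head? = some s) (hl : P.getLast? = some u) (hn : P.Nodup)
    (hc : P.IsChain (fun a b => b ∈ pvNbrs adj a)) (hs : s ∈ pvNbrs adj u)
    (h2 : 2 ≤ P.length) (hml : (P.length : Int) ≤ ml) :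
    pvGood adj s ml s [s] := by
  have build : ∀ (rest p : List Int) (u' : Int), p.getLast? = some u' → p ++ rest = P →
      pvGood adj s ml u' p := by
    intro rest
    induction rest with
    | nil =>
      intro p u' hp heq
      rw [List.append_nil] at heq
      subst heq
      rw [hl] at hp
      injection hp with hp
      subst hp
      exact pvGood.found hs rfl h2
    | cons r rs ih =>
      intro p u' hp heq
      have heq' : (p ++ [r]) ++ rs = P := by simpa using heq
      have hg := ih (p ++ [r]) r (by simp) heq'
      have hchain := heq ▸ hc
      have hedge : r ∈ pvNbrs adj u' := by
        have h3 := (List.isChain_append.1 hchain).2.2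
        exact h3 u' (by simp [hp]) r (by simp)
      have hnotmem : r ∉ p := by
        have hnd := heq ▸ hn
        have hx := (List.nodup_append.1 hnd).2.2
        intro hm
        exact hx r hm r (List.mem_cons_self ..) rfl
      have hlt : (p.length : Int) < ml := by
        have : p.length + (r :: rs).length = P.length := by
          rw [← heq]; simp
        simp only [List.length_cons] at this
        omega
      exact pvGood.step hedge hnotmem hlt hg
  obtain ⟨t, ht⟩ := List.head?_eq_some_iff.1 hh
  exact build t [s] s (by simp) (by rw [ht]; simp)

theorem pvAstart_iff (adj : List (Int × List Int)) (s ml : Int) :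
    pvALoop adj s ml [(s, [s])] = true ↔
      ∃ u, u ≠ s ∧ pvW adj s ((ml - 1).toNat) u ∧ s ∈ pvNbrs adj u := by
  rw [pvALoop_iff]
  have hsingle : (∃ it ∈ [((s : Int), [s])], pvGood adj s ml it.1 it.2) ↔ pvGood adj s ml s [s] := by
    simp
  rw [hsingle]
  constructor
  · intro hg
    exact pvGood_forward adj s ml s [s] hg (by simp) (by simp) (by simp)
      (by simp [pvW]) (Or.inr rfl)
  · rintro ⟨u, hne, hw, hs⟩
    obtain ⟨p, h1, h2, h3, h4, h5⟩ := pvW_to_path adj s _ u hw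
    have hlen2 : 2 ≤ p.length := by
      rcases p with _ | ⟨a, _ | ⟨b, t⟩⟩
      · simp at h1
      · exfalso
        simp at h1 h2
        subst h1
        exact hne h2.symm
      · simp
    have hml : (p.length : Int) ≤ ml := by omega
    exact pvPath_to_good adj s ml p u h1 h2 h3 h4 hs hlen2 hml

theorem pvBExpandOne_fst_mem (vis : PySem.Set Int) (nxt vs : List Int) (x : Int) :
    x ∈ (pvBExpandOne vis nxt vs).1 ↔ x ∈ vis ∨ x ∈ vs := by
  induction vs generalizing vis nxt with
  | nil => simp [pvBExpandOne]
  | cons v t ih =>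
    simp only [pvBExpandOne]
    split
    next hv =>
      rw [ih]
      simp only [List.mem_cons]
      constructor
      · rintro (h | h) <;> tauto
      · rintro (h | rfl | h)
        · tauto
        · exact Or.inl hv
        · tauto
    next hv =>
      rw [ih]
      rw [PySem.Set.mem_add]
      simp only [List.mem_cons]
      tauto

theorem pvBExpandOne_nxt_mono (vis : PySem.Set Int) (nxt vs : List Int) :
    ∀ x ∈ nxt, x ∈ (pvBExpandOne vis nxt vs).2 := by
  induction vs generalizing vis nxt with
  | nil => simp [pvBExpandOne]
  | cons v t ih =>
    intro x hx
    simp only [pvBExpandOne]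
    split
    · exact ih vis nxt x hx
    · exact ih _ _ x (List.mem_append.2 (Or.inl hx))

theorem pvBExpandOne_snd_sub (vis : PySem.Set Int) (nxt vs : List Int)
    (h : ∀ x ∈ nxt, x ∈ vis) :
    ∀ x ∈ (pvBExpandOne vis nxt vs).2, x ∈ (pvBExpandOne vis nxt vs).1 := by
  induction vs generalizing vis nxt with
  | nil => exact h
  | cons v t ih =>
    simp only [pvBExpandOne]
    split
    next hv => exact ih vis nxt h
    next hv =>
      apply ih
      intro x hx
      rw [PySem.Set.mem_add]
      rcases List.mem_append.1 hx with h' | h'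
      · exact Or.inl (h x h')
      · simp at h'
        exact Or.inr h'

theorem pvBExpandOne_new_in_snd (vis : PySem.Set Int) (nxt vs : List Int) (x : Int)
    (hx : x ∈ (pvBExpandOne vis nxt vs).1) (hnx : x ∉ vis) :
    x ∈ (pvBExpandOne vis nxt vs).2 := by
  induction vs generalizing vis nxt with
  | nil => exact absurd hx hnx
  | cons v t ih =>
    simp only [pvBExpandOne] at hx ⊢
    split at hx
    next hv =>
      rw [if_pos hv]
      exact ih vis nxt hx hnx
    next hv =>
      rw [if_neg hv]
      by_cases hxv : x = v
      · subst hxv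
        exact pvBExpandOne_nxt_mono _ _ _ x (List.mem_append.2 (Or.inr (List.mem_cons_self ..)))
      · apply ih _ _ hx
        rw [PySem.Set.mem_add]
        rintro (h | h)
        · exact hnx h
        · exact hxv h

theorem pvBExpand_fst_mem (adj : List (Int × List Int)) (vis : PySem.Set Int)
    (nxt fr : List Int) (x : Int) :
    x ∈ (pvBExpand adj vis nxt fr).1 ↔ x ∈ vis ∨ ∃ u ∈ fr, x ∈ pvNbrs adj u := by
  induction fr generalizing vis nxt with
  | nil => simp [pvBExpand]
  | cons u t ih =>
    simp only [pvBExpand]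
    rw [ih, pvBExpandOne_fst_mem]
    simp only [List.mem_cons]
    constructor
    · rintro ((h | h) | ⟨w, hw, hx⟩)
      · exact Or.inl h
      · exact Or.inr ⟨u, Or.inl rfl, h⟩
      · exact Or.inr ⟨w, Or.inr hw, hx⟩
    · rintro (h | ⟨w, (rfl | hw), hx⟩)
      · exact Or.inl (Or.inl h)
      · exact Or.inl (Or.inr hx)
      · exact Or.inr ⟨w, hw, hx⟩

theorem pvBExpand_nxt_mono (adj : List (Int × List Int)) (vis : PySem.Set Int)
    (nxt fr : List Int) : ∀ x ∈ nxt, x ∈ (pvBExpand adj vis nxt fr).2 := by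
  induction fr generalizing vis nxt with
  | nil => simp [pvBExpand]
  | cons u t ih =>
    intro x hx
    simp only [pvBExpand]
    exact ih _ _ x (pvBExpandOne_nxt_mono _ _ _ x hx)

theorem pvBExpand_snd_sub (adj : List (Int × List Int)) (vis : PySem.Set Int)
    (nxt fr : List Int) (h : ∀ x ∈ nxt, x ∈ vis) :
    ∀ x ∈ (pvBExpand adj vis nxt fr).2, x ∈ (pvBExpand adj vis nxt fr).1 := by
  induction fr generalizing vis nxt with
  | nil => exact h
  | cons u t ih =>
    simp only [pvBExpand]
    exact ih _ _ (pvBExpandOne_snd_sub vis nxt _ h)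

theorem pvBExpand_new_in_snd (adj : List (Int × List Int)) (vis : PySem.Set Int)
    (nxt fr : List Int) (x : Int) (hx : x ∈ (pvBExpand adj vis nxt fr).1)
    (hnx : x ∉ vis) : x ∈ (pvBExpand adj vis nxt fr).2 := by
  induction fr generalizing vis nxt with
  | nil => exact absurd hx hnx
  | cons u t ih =>
    simp only [pvBExpand] at hx ⊢
    by_cases hone : x ∈ (pvBExpandOne vis nxt (pvNbrs adj u)).1
    · exact pvBExpand_nxt_mono adj _ _ t x (pvBExpandOne_new_in_snd vis nxt _ x hone hnx)
    · exact ih _ _ hx hone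

theorem pvBLoop_spec (adj : List (Int × List Int)) (s : Int) :
    ∀ (fuel : Nat) (vis : PySem.Set Int) (fr : List Int) (j : Nat),
      (∀ x, x ∈ vis ↔ pvW adj s j x) → (∀ x ∈ fr, x ∈ vis) →
      (∀ u v, u ∈ vis → v ∈ pvNbrs adj u → u ∈ fr ∨ v ∈ vis) →
      ∀ x, x ∈ pvBLoop adj fuel vis fr ↔ pvW adj s (j + fuel) x := by
  intro fuel
  induction fuel with
  | zero =>
    intro vis fr j hvis hfr ha x
    simpa [pvBLoop] using hvis x
  | succ fuel ih =>
    intro vis fr j hvis hfr ha x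
    match fr with
    | [] =>
      have hcl : ∀ u v, u ∈ vis → v ∈ pvNbrs adj u → v ∈ vis := by
        intro u v hu hv
        rcases ha u v hu hv with h | h
        · simp at h
        · exact h
      have habs : ∀ (m : Nat) (y : Int), pvW adj s (j + m) y → y ∈ vis := by
        intro m
        induction m with
        | zero => intro y hy; exact (hvis y).2 hy
        | succ m ihm =>
          intro y hy
          rcases hy with hy | ⟨w, hw, hy⟩
          · exact ihm y hy
          · exact hcl w y (ihm w hw) hy
      show x ∈ vis ↔ _
      constructor
      · intro hx
        exact pvW_mono adj s (by omega) ((hvis x).1 hx)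
      · exact habs (fuel + 1) x
    | f :: ft =>
      show x ∈ pvBLoop adj fuel (pvBExpand adj vis [] (f :: ft)).1
          (pvBExpand adj vis [] (f :: ft)).2 ↔ _
      have hvis' : ∀ y, y ∈ (pvBExpand adj vis [] (f :: ft)).1 ↔ pvW adj s (j + 1) y := by
        intro y
        rw [pvBExpand_fst_mem]
        show _ ↔ pvW adj s j y ∨ ∃ w, pvW adj s j w ∧ y ∈ pvNbrs adj w
        constructor
        · rintro (h | ⟨u, hu, hy⟩)
          · exact Or.inl ((hvis y).1 h)
          · exact Or.inr ⟨u, (hvis u).1 (hfr u hu), hy⟩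
        · rintro (h | ⟨w, hw, hy⟩)
          · exact Or.inl ((hvis y).2 h)
          · rcases ha w y ((hvis w).2 hw) hy with h' | h'
            · exact Or.inr ⟨w, h', hy⟩
            · exact Or.inl h'
      have hfr' := pvBExpand_snd_sub adj vis [] (f :: ft) (by simp)
      have ha' : ∀ u v, u ∈ (pvBExpand adj vis [] (f :: ft)).1 → v ∈ pvNbrs adj u →
          u ∈ (pvBExpand adj vis [] (f :: ft)).2 ∨ v ∈ (pvBExpand adj vis [] (f :: ft)).1 := by
        intro u v hu hv
        by_cases huv : u ∈ vis
        · rcases ha u v huv hv with h | h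
          · right
            rw [pvBExpand_fst_mem]
            exact Or.inr ⟨u, h, hv⟩
          · right
            rw [pvBExpand_fst_mem]
            exact Or.inl h
        · exact Or.inl (pvBExpand_new_in_snd adj vis [] (f :: ft) u hu huv)
      have := ih (pvBExpand adj vis [] (f :: ft)).1 (pvBExpand adj vis [] (f :: ft)).2
        (j + 1) hvis' hfr' ha' x
      rw [this]
      have : j + 1 + fuel = j + (fuel + 1) := by omega
      rw [this]

theorem pvBStart_iff (adj : List (Int × List Int)) (s ml : Int) :
    pvBStart adj ml s = true ↔
      ∃ u, u ≠ s ∧ pvW adj s ((ml - 1).toNat) u ∧ s ∈ pvNbrs adj u := by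
  unfold pvBStart
  have hof : PySem.Set.ofList [s] = [s] := rfl
  rw [hof]
  have hspec := pvBLoop_spec adj s ((ml - 1).toNat) [s] [s] 0
    (by intro x; simp [pvW]) (by intro x hx; exact hx)
    (by intro u v hu hv; exact Or.inl hu)
  simp only [Nat.zero_add] at hspec
  rw [List.any_eq_true]
  constructor
  · rintro ⟨u, hu, hpred⟩
    simp only [Bool.and_eq_true, decide_eq_true_eq, List.contains_iff_mem] at hpred
    exact ⟨u, hpred.1, (hspec u).1 hu, hpred.2⟩
  · rintro ⟨u, hne, hw, hs⟩
    refine ⟨u, (hspec u).2 hw, ?_⟩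
    simp only [Bool.and_eq_true, decide_eq_true_eq, List.contains_iff_mem]
    exact ⟨hne, hs⟩

theorem pvOuter_eq (adj : List (Int × List Int)) (ml : Int) (l : List Int) :
    pvAOuter adj ml l = pvBOuter adj ml l := by
  induction l with
  | nil => rfl
  | cons s t ih =>
    have h : pvALoop adj s ml [(s, [s])] = pvBStart adj ml s :=
      Bool.eq_iff_iff.mpr ((pvAstart_iff adj s ml).trans (pvBStart_iff adj s ml).symm)
    simp only [pvAOuter, pvBOuter, h, ih]

-- ===== VERDICT (by name: the statement is the Claim_ definition above) =====
theorem has_directed_cycle_of_length_at_most_py_spec : Claim_equal_has_directed_cycle_of_length_at_most_py := by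
  intro adj n max_len _
  unfold Spec_has_directed_cycle_of_length_at_most_py
  unfold has_directed_cycle_of_length_at_most_py has_directed_cycle_of_length_at_most_py_alt
  exact pvOuter_eq adj max_len _
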